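-- pv_equiv track=rewrite | github.com/lucasVE-system/NetTrack | app.py | find_device_index
-- ===== SOURCE A (Python) =====
-- def find_device_index(devices, mac=None, ip=None) -> int:
--     if mac:
--         for i, d in enumerate(devices):
--             if d.get("mac") == mac:
--                 return i
--     if ip:
--         for i, d in enumerate(devices):
--             if d.get("ip") == ip:
--                 return i
--     return -1
-- ===== SOURCE B (Python) =====
-- def find_device_index(devices, mac=None, ip=None) -> int:
--     # One pass builds first-occurrence indexes; then O(1) lookups (mac before ip).
--     mac_to_idx = {}
--     ip_to_idx = {}
--     for i, d in enumerate(devices):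
--         m = d.get("mac")
--         if m is not None and m not in mac_to_idx:
--             mac_to_idx[m] = i
--         p = d.get("ip")
--         if p is not None and p not in ip_to_idx:
--             ip_to_idx[p] = i
--     if mac and mac in mac_to_idx:
--         return mac_to_idx[mac]
--     if ip and ip in ip_to_idx:
--         return ip_to_idx[ip]
--     return -1
-- ===== Notes on version B (the rewrite author's own statement) =====
-- stated objective: alternative
-- what changed: A rescans the device list once per key (two separate linear scans); B makes a single enumerate pass building first-occurrence mac->index and ip->index dictionaries and then answers with two O(1) lookups.
import Mathlib
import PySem

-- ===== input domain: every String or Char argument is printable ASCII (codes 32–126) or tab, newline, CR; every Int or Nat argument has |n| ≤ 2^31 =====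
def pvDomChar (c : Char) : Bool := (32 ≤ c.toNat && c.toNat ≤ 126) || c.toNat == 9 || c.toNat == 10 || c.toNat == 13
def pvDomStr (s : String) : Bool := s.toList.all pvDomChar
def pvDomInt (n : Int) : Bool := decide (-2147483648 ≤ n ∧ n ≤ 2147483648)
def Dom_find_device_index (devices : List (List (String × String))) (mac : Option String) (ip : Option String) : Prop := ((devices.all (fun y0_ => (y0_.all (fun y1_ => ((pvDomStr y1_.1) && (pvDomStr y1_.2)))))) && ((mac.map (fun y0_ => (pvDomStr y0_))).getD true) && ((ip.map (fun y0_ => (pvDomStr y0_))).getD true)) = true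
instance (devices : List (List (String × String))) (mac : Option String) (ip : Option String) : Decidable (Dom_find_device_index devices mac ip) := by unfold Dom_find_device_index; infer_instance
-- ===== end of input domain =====

-- B replaces A's two per-key linear scans by one enumerate pass building first-occurrence
-- mac->index and ip->index dictionaries followed by O(1) lookups (objective: alternative).

-- Python truthiness of an Optional[str]: None and "" are falsy.
def pyTruthyStr : Option String → Bool
  | some s => decide (s ≠ "")
  | none => false

-- ===== PORT A =====
-- 'for i, d in enumerate(devices): if d.get(key) == target: return i'
def scanA (key target : String) : List (List (String × String)) → Int → Option Int
  | [], _ => none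
  | d :: rest, i =>
    if (PySem.Dict.mk d).get? key = some target then some i
    else scanA key target rest (i + 1)

def find_device_index (devices : List (List (String × String))) (mac : Option String) (ip : Option String) : Int :=
  match (if pyTruthyStr mac then scanA "mac" (mac.getD "") devices 0 else none) with
  | some i => i
  | none =>
    match (if pyTruthyStr ip then scanA "ip" (ip.getD "") devices 0 else none) with
    | some i => i
    | none => -1

-- ===== PORT B =====
-- 'm = d.get(key); if m is not None and m not in dct: dct[m] = i'
def idxStep (key : String) (dct : PySem.Dict String Int) (i : Int) (d : List (String × String)) : PySem.Dict String Int :=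
  match (PySem.Dict.mk d).get? key with
  | some m => if dct.contains m then dct else dct.insert m i
  | none => dct

def find_device_index_alt (devices : List (List (String × String))) (mac : Option String) (ip : Option String) : Int :=
  let maps := (PySem.List.enumerate devices 0).foldl
    (fun acc p => (idxStep "mac" acc.1 p.1 p.2, idxStep "ip" acc.2 p.1 p.2))
    (PySem.Dict.empty, PySem.Dict.empty)
  if pyTruthyStr mac && maps.1.contains (mac.getD "") then maps.1.getD (mac.getD "") (-1)
  else if pyTruthyStr ip && maps.2.contains (ip.getD "") then maps.2.getD (ip.getD "") (-1)
  else -1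

-- ===== PRECONDITION & SPEC =====
def Spec_find_device_index (devices : List (List (String × String))) (mac : Option String) (ip : Option String) (out : Int) : Prop := out = find_device_index_alt devices mac ip
instance (devices : List (List (String × String))) (mac : Option String) (ip : Option String) (out : Int) : Decidable (Spec_find_device_index devices mac ip out) := by unfold Spec_find_device_index; infer_instance

-- ===== CLAIM (what is proved, stated in full; the proofs are below) =====
def Claim_equal_find_device_index : Prop := ∀ (devices : List (List (String × String))) (mac : Option String) (ip : Option String), Dom_find_device_index devices mac ip → Spec_find_device_index devices mac ip (find_device_index devices mac ip)

-- ===== LEMMAS AND PROOFS =====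

-- a fold whose step acts componentwise is the pair of the component folds
lemma foldl_pair {α β γ : Type} (f : α → γ → α) (g : β → γ → β) (l : List γ) (a : α) (b : β) :
    l.foldl (fun p c => (f p.1 c, g p.2 c)) (a, b) = (l.foldl f a, l.foldl g b) := by
  induction l generalizing a b with
  | nil => rfl
  | cons x xs ih => simp [List.foldl, ih]

-- the index dictionary built by B's pass answers exactly what A's scan from index s finds
lemma fold_get (key t : String) (devices : List (List (String × String))) (s : Int)
    (dct : PySem.Dict String Int) :
    ((PySem.List.enumerate devices s).foldl (fun a p => idxStep key a p.1 p.2) dct).get? t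
      = (dct.get? t).or (scanA key t devices s) := by
  induction devices generalizing s dct with
  | nil => simp [PySem.List.enumerate_nil, scanA]
  | cons d rest ih =>
    rw [PySem.List.enumerate_cons, List.foldl_cons, ih]
    cases h : (PySem.Dict.mk d).get? key with
    | none => simp [idxStep, scanA, h]
    | some m =>
      by_cases hc : dct.contains m
      · by_cases hmt : m = t
        · subst hmt
          have hsome : (dct.get? m).isSome := by
            rw [← PySem.Dict.contains_eq_isSome_get?]; exact hc
          obtain ⟨v, hv⟩ := Option.isSome_iff_exists.mp hsome
          simp [idxStep, scanA, h, hc, hv]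
        · simp [idxStep, scanA, h, hc, hmt]
      · have hc' : dct.contains m = false := by simpa using hc
        have hn : dct.get? m = none := by
          have h2 := PySem.Dict.contains_eq_isSome_get? (d := dct) (k := m)
          rw [hc'] at h2
          cases hnn : dct.get? m
          · rfl
          · rw [hnn] at h2; simp at h2
        by_cases hmt : t = m
        · subst hmt
          simp [idxStep, scanA, h, hc', hn]
        · simp [idxStep, scanA, h, hc', hmt, Ne.symm hmt, PySem.Dict.get?_insert]

-- B's dictionary lookups = A's scans from 0
lemma maps_get (t : String) (devices : List (List (String × String))) :
    (((PySem.List.enumerate devices 0).foldl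
        (fun acc p => (idxStep "mac" acc.1 p.1 p.2, idxStep "ip" acc.2 p.1 p.2))
        ((PySem.Dict.empty : PySem.Dict String Int), (PySem.Dict.empty : PySem.Dict String Int))).1.get? t
      = scanA "mac" t devices 0)
    ∧ (((PySem.List.enumerate devices 0).foldl
        (fun acc p => (idxStep "mac" acc.1 p.1 p.2, idxStep "ip" acc.2 p.1 p.2))
        ((PySem.Dict.empty : PySem.Dict String Int), (PySem.Dict.empty : PySem.Dict String Int))).2.get? t
      = scanA "ip" t devices 0) := by
  have hpair : (PySem.List.enumerate devices 0).foldl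
      (fun acc p => (idxStep "mac" acc.1 p.1 p.2, idxStep "ip" acc.2 p.1 p.2))
      ((PySem.Dict.empty : PySem.Dict String Int), (PySem.Dict.empty : PySem.Dict String Int))
      = ((PySem.List.enumerate devices 0).foldl (fun a p => idxStep "mac" a p.1 p.2) PySem.Dict.empty,
         (PySem.List.enumerate devices 0).foldl (fun a p => idxStep "ip" a p.1 p.2) PySem.Dict.empty) :=
    foldl_pair (fun a (p : Int × List (String × String)) => idxStep "mac" a p.1 p.2) (fun a (p : Int × List (String × String)) => idxStep "ip" a p.1 p.2) _ _ _
  rw [hpair]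
  constructor <;> · rw [fold_get]; simp [PySem.Dict.get?_empty]

-- ===== VERDICT (by name: the statement is the Claim_ definition above) =====
theorem find_device_index_spec : Claim_equal_find_device_index := by
  intro devices mac ip _
  unfold Spec_find_device_index find_device_index find_device_index_alt
  have hmac := (maps_get (mac.getD "") devices).1
  have hip := (maps_get (ip.getD "") devices).2
  simp only []
  by_cases hm : pyTruthyStr mac = true
  · cases hsm : scanA "mac" (mac.getD "") devices 0 with
    | some i =>
      have hc : (((PySem.List.enumerate devices 0).foldl
          (fun acc p => (idxStep "mac" acc.1 p.1 p.2, idxStep "ip" acc.2 p.1 p.2))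
          (PySem.Dict.empty, PySem.Dict.empty)).1).contains (mac.getD "") = true := by
        rw [PySem.Dict.contains_eq_isSome_get?, hmac, hsm]; rfl
      simp [hm, hsm, hc, PySem.Dict.getD_eq_get?_getD, hmac]
    | none =>
      have hc : (((PySem.List.enumerate devices 0).foldl
          (fun acc p => (idxStep "mac" acc.1 p.1 p.2, idxStep "ip" acc.2 p.1 p.2))
          (PySem.Dict.empty, PySem.Dict.empty)).1).contains (mac.getD "") = false := by
        rw [PySem.Dict.contains_eq_isSome_get?, hmac, hsm]; rfl
      by_cases hi : pyTruthyStr ip = true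
      · cases hsi : scanA "ip" (ip.getD "") devices 0 with
        | some j =>
          have hci : (((PySem.List.enumerate devices 0).foldl
              (fun acc p => (idxStep "mac" acc.1 p.1 p.2, idxStep "ip" acc.2 p.1 p.2))
              (PySem.Dict.empty, PySem.Dict.empty)).2).contains (ip.getD "") = true := by
            rw [PySem.Dict.contains_eq_isSome_get?, hip, hsi]; rfl
          simp [hm, hi, hsi, hc, hci, PySem.Dict.getD_eq_get?_getD, hip]
        | none =>
          have hci : (((PySem.List.enumerate devices 0).foldl
              (fun acc p => (idxStep "mac" acc.1 p.1 p.2, idxStep "ip" acc.2 p.1 p.2))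
              (PySem.Dict.empty, PySem.Dict.empty)).2).contains (ip.getD "") = false := by
            rw [PySem.Dict.contains_eq_isSome_get?, hip, hsi]; rfl
          simp [hm, hi, hc, hci]
      · have hi' : pyTruthyStr ip = false := by simpa using hi
        simp [hm, hi', hc]
  · have hm' : pyTruthyStr mac = false := by simpa using hm
    by_cases hi : pyTruthyStr ip = true
    · cases hsi : scanA "ip" (ip.getD "") devices 0 with
      | some j =>
        have hci : (((PySem.List.enumerate devices 0).foldl
            (fun acc p => (idxStep "mac" acc.1 p.1 p.2, idxStep "ip" acc.2 p.1 p.2))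
            (PySem.Dict.empty, PySem.Dict.empty)).2).contains (ip.getD "") = true := by
          rw [PySem.Dict.contains_eq_isSome_get?, hip, hsi]; rfl
        simp [hm', hi, hsi, hci, PySem.Dict.getD_eq_get?_getD, hip]
      | none =>
        have hci : (((PySem.List.enumerate devices 0).foldl
            (fun acc p => (idxStep "mac" acc.1 p.1 p.2, idxStep "ip" acc.2 p.1 p.2))
            (PySem.Dict.empty, PySem.Dict.empty)).2).contains (ip.getD "") = false := by
          rw [PySem.Dict.contains_eq_isSome_get?, hip, hsi]; rfl
        simp [hm', hi, hci]
    · have hi' : pyTruthyStr ip = false := by simpa using hi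
      simp [hm', hi']
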